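-- pv_equiv track=rewrite | github.com/zkytony/deep-semantic-mapping-iros19 | deepsm/dgsm/place_model.py | _count_class_samples
-- ===== SOURCE A (Python) =====
-- def _count_class_samples(scans, labels):
--     scans_by_class = {}
--     class_counts = {}
--     for i in range(len(scans)):
--         class_counts[labels[i]] = class_counts.get(labels[i], 0) + 1
--         if labels[i] not in scans_by_class:
--             scans_by_class[labels[i]] = []
--         scans_by_class[labels[i]].append(scans[i])
--     return class_counts, scans_by_class
-- ===== SOURCE B (Python) =====
-- def _count_class_samples(scans, labels):
--     n = len(scans)
--     seen = set()
--     order = []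
--     for i in range(n):
--         if labels[i] not in seen:
--             seen.add(labels[i])
--             order.append(labels[i])
--     class_counts = {}
--     scans_by_class = {}
--     for c in order:
--         group = [scans[i] for i in range(n) if labels[i] == c]
--         class_counts[c] = len(group)
--         scans_by_class[c] = group
--     return class_counts, scans_by_class
-- ===== Notes on version B (the rewrite author's own statement) =====
-- stated objective: alternative
-- what changed: B replaces A's single-pass dict-of-appends-with-live-counter by a two-phase selection algorithm: first compute the distinct class labels in first-occurrence order, then build each class's group by a full filtering scan over all indices and take its length as the count.
import Mathlib
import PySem

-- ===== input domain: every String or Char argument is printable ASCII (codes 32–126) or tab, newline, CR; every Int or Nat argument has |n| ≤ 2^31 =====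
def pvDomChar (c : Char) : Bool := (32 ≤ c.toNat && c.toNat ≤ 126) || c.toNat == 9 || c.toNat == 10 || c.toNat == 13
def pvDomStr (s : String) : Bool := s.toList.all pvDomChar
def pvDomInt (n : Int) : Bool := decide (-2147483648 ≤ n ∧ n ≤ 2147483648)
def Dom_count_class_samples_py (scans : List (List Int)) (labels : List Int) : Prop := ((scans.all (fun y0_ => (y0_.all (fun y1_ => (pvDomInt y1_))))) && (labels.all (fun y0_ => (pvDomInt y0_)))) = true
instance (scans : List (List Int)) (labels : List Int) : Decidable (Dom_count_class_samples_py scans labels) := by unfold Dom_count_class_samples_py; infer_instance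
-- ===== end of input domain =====

-- B is a two-phase selection algorithm (distinct labels first, then one filtering scan per class),
-- replacing A's single-pass grouping with a live counter (alternative decomposition, not faster).

-- ===== PORT A =====
-- one loop iteration of A: update the live counter, then ensure the key exists and append scans[i]
def pvStepA (scans : List (List Int)) (labels : List Int)
    (p : PySem.Dict Int Int × PySem.Dict Int (List (List Int))) (i : Nat) :
    PySem.Dict Int Int × PySem.Dict Int (List (List Int)) :=
  let lab := PySem.List.pyGetD labels (i : Int) 0
  let cc := p.1.insert lab (p.1.getD lab 0 + 1)
  let g := if p.2.contains lab then p.2 else p.2.insert lab []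
  (cc, g.modify lab [] (· ++ [PySem.List.pyGetD scans (i : Int) []]))

def count_class_samples_py (scans : List (List Int)) (labels : List Int) :
    (List (Int × Int)) × (List (Int × List (List Int))) :=
  let st := (List.range scans.length).foldl (pvStepA scans labels) (PySem.Dict.empty, PySem.Dict.empty)
  (st.1.items, st.2.items)

-- ===== PORT B =====
-- first loop of B: if labels[i] not in seen: seen.add(labels[i]); order.append(labels[i])
def pvOrderStep (labels : List Int) (p : PySem.Set Int × List Int) (i : Nat) :
    PySem.Set Int × List Int :=
  let l := PySem.List.pyGetD labels (i : Int) 0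
  if PySem.Set.contains p.1 l then p else (PySem.Set.add p.1 l, p.2 ++ [l])

-- group = [scans[i] for i in range(n) if labels[i] == c]
def pvGroup (scans : List (List Int)) (labels : List Int) (n : Nat) (c : Int) : List (List Int) :=
  ((List.range n).filter (fun (i : Nat) => PySem.List.pyGetD labels (i : Int) 0 == c)).map
    (fun (i : Nat) => PySem.List.pyGetD scans (i : Int) [])

def count_class_samples_py_alt (scans : List (List Int)) (labels : List Int) :
    (List (Int × Int)) × (List (Int × List (List Int))) :=
  let n := scans.length
  let order := ((List.range n).foldl (pvOrderStep labels) (PySem.Set.empty, [])).2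
  let st := order.foldl
    (fun (p : PySem.Dict Int Int × PySem.Dict Int (List (List Int))) c =>
      let group := pvGroup scans labels n c
      (p.1.insert c (group.length : Int), p.2.insert c group))
    (PySem.Dict.empty, PySem.Dict.empty)
  (st.1.items, st.2.items)

-- ===== PRECONDITION & SPEC =====
-- Pre_ excludes exactly the inputs where labels is shorter than scans: there labels[i] raises IndexError in A (and in B).
def Pre_count_class_samples_py (scans : List (List Int)) (labels : List Int) : Prop :=
  scans.length ≤ labels.length
instance (scans : List (List Int)) (labels : List Int) : Decidable (Pre_count_class_samples_py scans labels) := by unfold Pre_count_class_samples_py; infer_instance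

def pvWitness_count_class_samples_py : List (List Int) × List Int := ([[1, 2], [3], [4]], [7, 5, 7])

def Spec_count_class_samples_py (scans : List (List Int)) (labels : List Int) (out : (List (Int × Int)) × (List (Int × List (List Int)))) : Prop := out = count_class_samples_py_alt scans labels
instance (scans : List (List Int)) (labels : List Int) (out : (List (Int × Int)) × (List (Int × List (List Int)))) : Decidable (Spec_count_class_samples_py scans labels out) := by unfold Spec_count_class_samples_py; infer_instance

-- ===== CLAIM (what is proved, stated in full; the proofs are below) =====
def Claim_equal_count_class_samples_py : Prop := ∀ (scans : List (List Int)) (labels : List Int), Dom_count_class_samples_py scans labels → Pre_count_class_samples_py scans labels → Spec_count_class_samples_py scans labels (count_class_samples_py scans labels)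

-- ===== LEMMAS AND PROOFS =====

-- abbreviations for the proof: label/scan at index i
def labAt (labels : List Int) (i : Nat) : Int := PySem.List.pyGetD labels (i : Int) 0
def scanAt (scans : List (List Int)) (i : Nat) : List Int := PySem.List.pyGetD scans (i : Int) []

-- the grouping fold A's groups dict performs (after removing the redundant key-creation branch)
def pvMod (scans : List (List Int)) (labels : List Int)
    (d : PySem.Dict Int (List (List Int))) (i : Nat) : PySem.Dict Int (List (List Int)) :=
  d.modify (labAt labels i) [] (· ++ [scanAt scans i])

-- the counts dict A maintains, expressed as a function of the groups dict
def lenD (d : PySem.Dict Int (List (List Int))) : PySem.Dict Int Int :=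
  ⟨d.items.map (fun p => (p.1, (p.2.length : Int)))⟩

theorem contains_lenD (d : PySem.Dict Int (List (List Int))) (k : Int) :
    (lenD d).contains k = d.contains k := by
  simp only [lenD, PySem.Dict.contains, List.any_map]; rfl

theorem get?_lenD (d : PySem.Dict Int (List (List Int))) (k : Int) :
    (lenD d).get? k = (d.get? k).map (fun v => (v.length : Int)) := by
  simp only [lenD, PySem.Dict.get?, List.find?_map, Option.map_map]; rfl

theorem getD_lenD (d : PySem.Dict Int (List (List Int))) (k : Int) :
    (lenD d).getD k 0 = ((d.getD k []).length : Int) := by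
  simp only [PySem.Dict.getD, get?_lenD]
  cases d.get? k <;> simp

theorem insert_lenD (d : PySem.Dict Int (List (List Int))) (k : Int) (v : List (List Int)) :
    lenD (d.insert k v) = (lenD d).insert k ((v.length : Int)) := by
  simp only [PySem.Dict.insert, contains_lenD]
  by_cases h : d.contains k = true
  · simp only [h, if_true, lenD, List.map_map]
    congr 1
    apply List.map_congr_left
    intro p _
    by_cases hk : p.1 = k <;> simp [hk]
  · simp [h, lenD]

theorem modify_lenD (d : PySem.Dict Int (List (List Int))) (k : Int) (x : List Int) :
    lenD (d.modify k [] (· ++ [x])) = (lenD d).insert k ((lenD d).getD k 0 + 1) := by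
  simp only [PySem.Dict.modify, insert_lenD, getD_lenD]
  congr 1
  simp

theorem group_if_insert (d : PySem.Dict Int (List (List Int))) (k : Int) (x : List Int) :
    (if d.contains k then d else d.insert k []).modify k [] (· ++ [x])
      = d.modify k [] (· ++ [x]) := by
  by_cases h : d.contains k = true
  · simp [h]
  · have hc : d.contains k = false := by simp [h]
    simp [h, PySem.Dict.modify, PySem.Dict.getD_insert_self,
      PySem.Dict.insert_insert_self, PySem.Dict.getD_of_not_contains d _ hc]

theorem stepA_eq (scans : List (List Int)) (labels : List Int)
    (d : PySem.Dict Int (List (List Int))) (i : Nat) :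
    pvStepA scans labels (lenD d, d) i = (lenD (pvMod scans labels d i), pvMod scans labels d i) := by
  simp only [pvStepA, pvMod, labAt, scanAt, group_if_insert, modify_lenD]

-- A's fold carries (lenD d, d) where d is the pure grouping fold
theorem loopA_eq (scans : List (List Int)) (labels : List Int) (l : List Nat)
    (d : PySem.Dict Int (List (List Int))) :
    l.foldl (pvStepA scans labels) (lenD d, d)
      = (lenD (l.foldl (pvMod scans labels) d), l.foldl (pvMod scans labels) d) := by
  induction l generalizing d with
  | nil => rfl
  | cons i t ih =>
      simp only [List.foldl_cons, stepA_eq]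
      exact ih _

-- B's first loop: seen and order stay the same list, and it is the Set-fold of the labels
theorem orderFold_eq (labels : List Int) (l : List Nat) (s : PySem.Set Int) :
    l.foldl (pvOrderStep labels) (s, s)
      = (l.foldl (fun t i => PySem.Set.add t (labAt labels i)) s,
         l.foldl (fun t i => PySem.Set.add t (labAt labels i)) s) := by
  induction l generalizing s with
  | nil => rfl
  | cons i t ih =>
      simp only [List.foldl_cons]
      by_cases h : labAt labels i ∈ s
      · have hc : PySem.Set.contains s (labAt labels i) = true := (PySem.Set.contains_iff s _).mpr h
        simp only [labAt] at hc
        rw [show pvOrderStep labels (s, s) i = (s, s) from by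
              simp only [pvOrderStep]; rw [if_pos hc],
            PySem.Set.add_of_mem h]
        exact ih s
      · have hc : ¬ (PySem.Set.contains s (labAt labels i) = true) :=
          fun hh => h ((PySem.Set.contains_iff s _).mp hh)
        simp only [labAt] at hc
        rw [show pvOrderStep labels (s, s) i
              = (PySem.Set.add s (labAt labels i), s ++ [labAt labels i]) from by
              simp only [pvOrderStep, labAt]; rw [if_neg hc],
            PySem.Set.add_of_not_mem h]
        exact ih (s ++ [labAt labels i])

-- the distinct-label list B computes
theorem order_eq (labels : List Int) (l : List Nat) :
    (l.foldl (pvOrderStep labels) (PySem.Set.empty, [])).2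
      = PySem.Set.ofList (l.map (labAt labels)) := by
  have h := orderFold_eq labels l PySem.Set.empty
  rw [show (PySem.Set.empty, ([] : List Int)) = ((PySem.Set.empty : PySem.Set Int), (PySem.Set.empty : PySem.Set Int)) from rfl, h]
  show l.foldl (fun t i => PySem.Set.add t (labAt labels i)) PySem.Set.empty
      = PySem.Set.ofList (l.map (labAt labels))
  rw [← PySem.Set.update_map_eq_foldl_add l (labAt labels) PySem.Set.empty]
  exact PySem.Set.update_nil_left _

-- keys of A's grouping fold: distinct labels in first-occurrence order
theorem keys_dA (scans : List (List Int)) (labels : List Int) (l : List Nat) :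
    (l.foldl (pvMod scans labels) PySem.Dict.empty).keys
      = PySem.Set.ofList (l.map (labAt labels)) := by
  have h := PySem.Dict.keys_foldl_modify_key (l := l) (key := labAt labels)
      (d0 := ([] : List (List Int))) (f := fun _ i => (· ++ [scanAt scans i]))
      (d := PySem.Dict.empty)
  simpa [pvMod, PySem.Dict.keys_empty, PySem.Set.update_nil_left] using h

theorem nodup_keys_dA (scans : List (List Int)) (labels : List Int) (l : List Nat) :
    (l.foldl (pvMod scans labels) PySem.Dict.empty).keys.Nodup := by
  rw [keys_dA]; exact PySem.Set.nodup_ofList _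

-- value of A's grouping fold at a key: exactly B's filtering group
theorem getD_dA (scans : List (List Int)) (labels : List Int) (n : Nat) (c : Int) :
    ((List.range n).foldl (pvMod scans labels) PySem.Dict.empty).getD c []
      = pvGroup scans labels n c := by
  have hfold : (List.range n).foldl (pvMod scans labels) PySem.Dict.empty
      = ((List.range n).map (fun i => (labAt labels i, scanAt scans i))).foldl
          (fun d p => d.modify p.1 [] (· ++ [p.2])) PySem.Dict.empty := by
    rw [List.foldl_map]; rfl
  rw [hfold, PySem.Dict.getD_foldl_modify_append]
  rw [PySem.Dict.getD_empty, List.nil_append, List.filter_map, List.map_map]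
  simp [pvGroup, Function.comp_def, labAt, scanAt]

-- ===== VERDICT (by name: the statement is the Claim_ definition above) =====
theorem count_class_samples_py_spec : Claim_equal_count_class_samples_py := by
  intro scans labels _ _
  unfold Spec_count_class_samples_py count_class_samples_py count_class_samples_py_alt
  have hA := loopA_eq scans labels (List.range scans.length) PySem.Dict.empty
  have he : lenD PySem.Dict.empty = PySem.Dict.empty := rfl
  rw [he] at hA
  set n := scans.length
  set dA := (List.range n).foldl (pvMod scans labels) PySem.Dict.empty with hdA
  -- B's order list is exactly dA's key list
  have horder : ((List.range n).foldl (pvOrderStep labels) (PySem.Set.empty, [])).2 = dA.keys := by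
    rw [order_eq, keys_dA]
  have hnd : dA.keys.Nodup := nodup_keys_dA scans labels _
  -- split B's pair fold into its components
  have hsplit : dA.keys.foldl
      (fun (p : PySem.Dict Int Int × PySem.Dict Int (List (List Int))) c =>
        let group := pvGroup scans labels n c
        (p.1.insert c (group.length : Int), p.2.insert c group))
      (PySem.Dict.empty, PySem.Dict.empty)
      = (dA.keys.foldl (fun d c => d.insert c ((pvGroup scans labels n c).length : Int)) PySem.Dict.empty,
         dA.keys.foldl (fun d c => d.insert c (pvGroup scans labels n c)) PySem.Dict.empty) :=
    PySem.List.foldl_prod_mk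
      (fun d c => d.insert c ((pvGroup scans labels n c).length : Int))
      (fun d c => d.insert c (pvGroup scans labels n c)) dA.keys PySem.Dict.empty PySem.Dict.empty
  -- items of the two insert folds over fresh distinct keys
  have hfresh1 : (dA.keys.foldl (fun d c => d.insert c ((pvGroup scans labels n c).length : Int)) PySem.Dict.empty).items
      = dA.keys.map (fun c => (c, ((pvGroup scans labels n c).length : Int))) := by
    have := PySem.Dict.items_foldl_insert_fresh (l := dA.keys) (k := fun c => c)
        (v := fun c => ((pvGroup scans labels n c).length : Int)) (d := PySem.Dict.empty)
        (by intro a _; rfl) (by simpa using hnd)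
    simpa using this
  have hfresh2 : (dA.keys.foldl (fun d c => d.insert c (pvGroup scans labels n c)) PySem.Dict.empty).items
      = dA.keys.map (fun c => (c, pvGroup scans labels n c)) := by
    have := PySem.Dict.items_foldl_insert_fresh (l := dA.keys) (k := fun c => c)
        (v := fun c => pvGroup scans labels n c) (d := PySem.Dict.empty)
        (by intro a _; rfl) (by simpa using hnd)
    simpa using this
  -- A's items, expressed over dA.keys
  have hitems : dA.items = dA.keys.map (fun c => (c, dA.getD c [])) :=
    PySem.Dict.items_eq_map_keys dA hnd []
  have hgetD : ∀ c, dA.getD c [] = pvGroup scans labels n c := fun c => getD_dA scans labels n c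
  simp only [hA, horder, hsplit, hfresh1, hfresh2]
  simp only [Prod.mk.injEq]
  refine ⟨?_, ?_⟩
  · -- counts component
    show dA.items.map (fun p => (p.1, (p.2.length : Int)))
        = dA.keys.map (fun c => (c, ((pvGroup scans labels n c).length : Int)))
    rw [hitems, List.map_map]
    apply List.map_congr_left
    intro c _
    simp [hgetD c]
  · -- groups component
    rw [hitems]
    apply List.map_congr_left
    intro c _
    simp [hgetD c]
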